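-- pv_equiv track=rewrite | github.com/uavkz/SwarMown | mainapp/to_refactor_services.py | when_to_move_forward
-- ===== SOURCE A (Python) =====
-- def extra_path_cycle(estim_pathes, given_drone_num, truck_path, drones, remainder, field, circles):
--     rem_init = remainder
--     for i in range(given_drone_num):  # for every drone in the field
--         path = []
--         path.append(truck_path[field])  # starts from 0
--         path.append([1])  # fly the path
--         if rem_init == 0:
--             path.append(truck_path[field + 1])
--         else:
--             for j in range(circles):
--                 path.append(truck_path[field])  # after flight goes to 0 j times
--                 if j != circles - 1:
--                     path.append([1])
--                 elif j == circles - 1 and remainder > 0: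
--                     path.append([1])
--                     remainder -= 1
--                 else:
--                     path.append(truck_path[field])
--             path.append(truck_path[field + 1])  # then goes to the next stop
--         drones[i].append(path)
--
--     return drones
--
-- def full_cycle(estim_pathes, given_drone_num, truck_path, drones, field):  # нельзя редачить то что приходит
--     # в параметрах
--     rounds = int(estim_pathes[field] / given_drone_num)
--     for i in range(given_drone_num):
--         path = []
--         for _ in range(rounds):
--             path.append(truck_path[field])
--             path.append([1])
--         path.append(truck_path[field + 1])
--         drones[i].append(path)
--
--     return drones
--
-- def extra_drone_cycle(estim_pathes, given_drone_num, truck_path, drones, field):  # нельзя редачить то что приходит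
--     # в параметрах
--     pathways = estim_pathes[field]
--     for i in range(given_drone_num):
--         path = []
--         path.append(truck_path[field])  # starts from 0
--         if pathways > 0:
--             path.append([1])  # fly the path
--             path.append(truck_path[field + 1])
--             pathways -= 1
--         else:
--             path.append(truck_path[field])
--             path.append(truck_path[field + 1])
--         drones[i].append(path)
--
--     return drones
--
-- def when_to_move_forward(truck_path, given_drone_num, estim_pathes):
--     '''
--     Input:
--     truck_path = [[1000, 100], [1000, 300], [1000, 500], [1000, 700]]
--     given_drone_num = 2
--     estim_pathes = [3,2,2] -number of pathways in each subfield
--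
--     Output:
--     for drone d and field f -
--     [starting point, path, ending point=starting point, path, ending point]
--     '''
--     drones = {k: [] for k in range(given_drone_num)}  # create a dict with key to each drone
--
--     for field in range(len(estim_pathes)):  # for every field
--         circles = estim_pathes[field] // given_drone_num
--         remainder = (estim_pathes[field] % given_drone_num)
--
--         if circles > 0 and remainder > 0:  # 7 pathways and 5 drones, 7 pathways and 2 drones
--             drones = extra_path_cycle(estim_pathes, given_drone_num, truck_path, drones, remainder, field, circles)
--
--         elif circles > 0 and remainder == 0:  # 4 pathways and 2 drones
--             drones = full_cycle(estim_pathes, given_drone_num, truck_path, drones, field)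
--
--         else:  # 2 pathways and 3 drones
--             drones = extra_drone_cycle(estim_pathes, given_drone_num, truck_path, drones, field)
--
--     return drones
-- ===== SOURCE B (Python) =====
-- def _drone_field_path(truck_path, given_drone_num, i, field, pathways):
--     """Path of drone i on one field, computed directly (no shared counters):
--     drone i is an 'extra' drone exactly when i < remainder."""
--     start, nxt = truck_path[field], truck_path[field + 1]
--     circles, rem = divmod(pathways, given_drone_num)
--     if circles > 0:
--         if rem == 0:
--             return [start, [1]] * circles + [nxt]
--         if i < rem:
--             return [start, [1]] * (circles + 1) + [nxt]
--         return [start, [1]] * circles + [start, start, nxt]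
--     if i < pathways:
--         return [start, [1], nxt]
--     return [start, start, nxt]
--
--
-- def when_to_move_forward(truck_path, given_drone_num, estim_pathes):
--     return {i: [_drone_field_path(truck_path, given_drone_num, i, field, p)
--                 for field, p in enumerate(estim_pathes)]
--             for i in range(given_drone_num)}
-- ===== Notes on version B (the rewrite author's own statement) =====
-- stated objective: simpler
-- what changed: Replaces the three mutating helper loops and shared decrementing counters with a single pure per-(drone,field) path function (drone i is 'extra' iff i < remainder) assembled by dict/list comprehensions, drone-outer field-inner.
import Mathlib
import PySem

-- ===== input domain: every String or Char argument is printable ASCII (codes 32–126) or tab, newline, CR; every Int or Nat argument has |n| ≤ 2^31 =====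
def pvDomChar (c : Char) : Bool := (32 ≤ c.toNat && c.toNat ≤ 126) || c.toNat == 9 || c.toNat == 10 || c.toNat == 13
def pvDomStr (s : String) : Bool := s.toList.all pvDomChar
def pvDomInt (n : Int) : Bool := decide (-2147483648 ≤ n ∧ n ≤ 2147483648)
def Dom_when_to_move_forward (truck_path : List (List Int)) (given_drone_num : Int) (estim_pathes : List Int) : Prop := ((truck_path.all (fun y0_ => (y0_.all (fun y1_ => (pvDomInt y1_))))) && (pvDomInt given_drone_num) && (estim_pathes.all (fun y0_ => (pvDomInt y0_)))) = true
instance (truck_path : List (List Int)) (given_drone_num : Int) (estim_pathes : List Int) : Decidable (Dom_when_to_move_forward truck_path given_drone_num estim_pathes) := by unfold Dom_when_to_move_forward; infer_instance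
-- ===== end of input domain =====

-- B replaces A's three mutating helper loops and shared decrementing counters by one pure
-- per-(drone,field) path function ('extra' drone ⟺ i < remainder) assembled by comprehensions (objective: simpler).

-- ===== PORT A =====
-- truck_path[x] / estim_pathes[x] are ported with pyGetD _ _ default: inside Pre_ every such
-- index is in range, so the default is never read (out-of-range indexing is excluded by Pre_).
def extra_path_cycle (estim_pathes : List Int) (given_drone_num : Int) (truck_path : List (List Int))
    (drones : PySem.Dict Int (List (List (List Int)))) (remainder field circles : Int) :
    PySem.Dict Int (List (List (List Int))) :=
  let rem_init := remainder
  let res := (PySem.List.pyRange 0 given_drone_num).foldl (fun st i =>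
    let path : List (List Int) := [] ++ [PySem.List.pyGetD truck_path field []] ++ [[1]]
    if rem_init = 0 then
      (st.1.modify i [] (· ++ [path ++ [PySem.List.pyGetD truck_path (field + 1) []]]), st.2)
    else
      let inner := (PySem.List.pyRange 0 circles).foldl (fun pr j =>
        let path := pr.1 ++ [PySem.List.pyGetD truck_path field []]
        if j ≠ circles - 1 then (path ++ [[1]], pr.2)
        else if j = circles - 1 ∧ pr.2 > 0 then (path ++ [[1]], pr.2 - 1)
        else (path ++ [PySem.List.pyGetD truck_path field []], pr.2))
        (path, st.2)
      (st.1.modify i [] (· ++ [inner.1 ++ [PySem.List.pyGetD truck_path (field + 1) []]]), inner.2))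
    (drones, remainder)
  res.1

def full_cycle (estim_pathes : List Int) (given_drone_num : Int) (truck_path : List (List Int))
    (drones : PySem.Dict Int (List (List (List Int)))) (field : Int) :
    PySem.Dict Int (List (List (List Int))) :=
  -- rounds = int(estim_pathes[field] / given_drone_num): true division then truncation = truncdiv on this domain
  let rounds := PySem.Int.truncdiv (PySem.List.pyGetD estim_pathes field 0) given_drone_num
  (PySem.List.pyRange 0 given_drone_num).foldl (fun d i =>
    let path := (PySem.List.pyRange 0 rounds).foldl (fun p _ =>
      p ++ [PySem.List.pyGetD truck_path field []] ++ [[1]]) ([] : List (List Int))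
    d.modify i [] (· ++ [path ++ [PySem.List.pyGetD truck_path (field + 1) []]])) drones

def extra_drone_cycle (estim_pathes : List Int) (given_drone_num : Int) (truck_path : List (List Int))
    (drones : PySem.Dict Int (List (List (List Int)))) (field : Int) :
    PySem.Dict Int (List (List (List Int))) :=
  let res := (PySem.List.pyRange 0 given_drone_num).foldl (fun st i =>
    let path : List (List Int) := [PySem.List.pyGetD truck_path field []]
    if st.2 > 0 then
      (st.1.modify i [] (· ++ [path ++ [[1]] ++ [PySem.List.pyGetD truck_path (field + 1) []]]), st.2 - 1)
    else
      (st.1.modify i [] (· ++ [path ++ [PySem.List.pyGetD truck_path field []] ++ [PySem.List.pyGetD truck_path (field + 1) []]]), st.2))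
    (drones, PySem.List.pyGetD estim_pathes field 0)
  res.1

def when_to_move_forward (truck_path : List (List Int)) (given_drone_num : Int) (estim_pathes : List Int) : List (Int × List (List (List Int))) :=
  let drones : PySem.Dict Int (List (List (List Int))) :=
    (PySem.List.pyRange 0 given_drone_num).foldl (fun d k => d.insert k []) PySem.Dict.empty
  let drones := (PySem.List.pyRange 0 (estim_pathes.length : Int)).foldl (fun drones field =>
    let circles := PySem.Int.floordiv (PySem.List.pyGetD estim_pathes field 0) given_drone_num
    let remainder := PySem.Int.mod (PySem.List.pyGetD estim_pathes field 0) given_drone_num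
    if circles > 0 ∧ remainder > 0 then
      extra_path_cycle estim_pathes given_drone_num truck_path drones remainder field circles
    else if circles > 0 ∧ remainder = 0 then
      full_cycle estim_pathes given_drone_num truck_path drones field
    else
      extra_drone_cycle estim_pathes given_drone_num truck_path drones field) drones
  drones.items

-- ===== PORT B =====
-- [start, [1]] * k is ported as (List.replicate k [start, [1]]).flatten
def dronePath (truck_path : List (List Int)) (given_drone_num i field pathways : Int) : List (List Int) :=
  let start := PySem.List.pyGetD truck_path field []
  let nxt := PySem.List.pyGetD truck_path (field + 1) []
  let circles := PySem.Int.floordiv pathways given_drone_num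
  let rem := PySem.Int.mod pathways given_drone_num
  if circles > 0 then
    if rem = 0 then (List.replicate circles.toNat [start, [1]]).flatten ++ [nxt]
    else if i < rem then (List.replicate (circles.toNat + 1) [start, [1]]).flatten ++ [nxt]
    else (List.replicate circles.toNat [start, [1]]).flatten ++ [start, start, nxt]
  else if i < pathways then [start, [1], nxt]
  else [start, start, nxt]

def when_to_move_forward_alt (truck_path : List (List Int)) (given_drone_num : Int) (estim_pathes : List Int) : List (Int × List (List (List Int))) :=
  (PySem.List.pyRange 0 given_drone_num).map (fun i =>
    (i, (PySem.List.enumerate estim_pathes).map (fun fp =>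
          dronePath truck_path given_drone_num i fp.1 fp.2)))

-- ===== PRECONDITION & SPEC =====
-- Pre_ excludes exactly the inputs where Python A raises: given_drone_num = 0 with a non-empty
-- estim_pathes (ZeroDivisionError), and 0 < given_drone_num with truck_path too short for the
-- field indexing truck_path[field + 1] (IndexError).
def Pre_when_to_move_forward (truck_path : List (List Int)) (given_drone_num : Int) (estim_pathes : List Int) : Prop :=
  estim_pathes ≠ [] → (given_drone_num < 0 ∨ (0 < given_drone_num ∧ estim_pathes.length + 1 ≤ truck_path.length))
instance (truck_path : List (List Int)) (given_drone_num : Int) (estim_pathes : List Int) : Decidable (Pre_when_to_move_forward truck_path given_drone_num estim_pathes) := by unfold Pre_when_to_move_forward; infer_instance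
def pvWitness_when_to_move_forward : List (List Int) × Int × List Int := ([[1000, 100], [1000, 300], [1000, 500], [1000, 700]], 2, [3, 2, 2])

def Spec_when_to_move_forward (truck_path : List (List Int)) (given_drone_num : Int) (estim_pathes : List Int) (out : List (Int × List (List (List Int)))) : Prop := out = when_to_move_forward_alt truck_path given_drone_num estim_pathes
instance (truck_path : List (List Int)) (given_drone_num : Int) (estim_pathes : List Int) (out : List (Int × List (List (List Int)))) : Decidable (Spec_when_to_move_forward truck_path given_drone_num estim_pathes out) := by unfold Spec_when_to_move_forward; infer_instance

-- ===== CLAIM (what is proved, stated in full; the proofs are below) =====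
def Claim_equal_when_to_move_forward : Prop := ∀ (truck_path : List (List Int)) (given_drone_num : Int) (estim_pathes : List Int), Dom_when_to_move_forward truck_path given_drone_num estim_pathes → Pre_when_to_move_forward truck_path given_drone_num estim_pathes → Spec_when_to_move_forward truck_path given_drone_num estim_pathes (when_to_move_forward truck_path given_drone_num estim_pathes)

-- ===== LEMMAS AND PROOFS =====

theorem pyRange_zero_eq (n : Int) :
    PySem.List.pyRange 0 n = List.map (fun (k : Nat) => (k : Int)) (List.range n.toNat) := by
  rcases le_or_gt 0 n with h | h
  · have h2 := PySem.List.pyRange_zero_natCast n.toNat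
    rwa [Int.toNat_of_nonneg h] at h2
  · have h0 : n.toNat = 0 := by omega
    rw [h0]
    simp only [List.range_zero, List.map_nil, PySem.List.pyRange]
    norm_num
    intro h'
    omega

theorem length_pyRange_zero (n : Int) : (PySem.List.pyRange 0 n).length = n.toNat := by
  rw [pyRange_zero_eq]; simp


abbrev DictT := PySem.Dict Int (List (List (List Int)))

-- the drone-loop bodies of A's three helpers, named so the fold lemmas can speak about them
def stepE1 (truck_path : List (List Int)) (field circles rem_init : Int) (st : DictT × Int) (i : Int) : DictT × Int :=
  let path : List (List Int) := [] ++ [PySem.List.pyGetD truck_path field []] ++ [[1]]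
  if rem_init = 0 then
    (st.1.modify i [] (· ++ [path ++ [PySem.List.pyGetD truck_path (field + 1) []]]), st.2)
  else
    let inner := (PySem.List.pyRange 0 circles).foldl (fun pr j =>
      let path := pr.1 ++ [PySem.List.pyGetD truck_path field []]
      if j ≠ circles - 1 then (path ++ [[1]], pr.2)
      else if j = circles - 1 ∧ pr.2 > 0 then (path ++ [[1]], pr.2 - 1)
      else (path ++ [PySem.List.pyGetD truck_path field []], pr.2))
      (path, st.2)
    (st.1.modify i [] (· ++ [inner.1 ++ [PySem.List.pyGetD truck_path (field + 1) []]]), inner.2)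

def stepE2 (truck_path : List (List Int)) (field rounds : Int) (d : DictT) (i : Int) : DictT :=
  let path := (PySem.List.pyRange 0 rounds).foldl (fun p _ =>
    p ++ [PySem.List.pyGetD truck_path field []] ++ [[1]]) ([] : List (List Int))
  d.modify i [] (· ++ [path ++ [PySem.List.pyGetD truck_path (field + 1) []]])

def stepE3 (truck_path : List (List Int)) (field : Int) (st : DictT × Int) (i : Int) : DictT × Int :=
  let path : List (List Int) := [PySem.List.pyGetD truck_path field []]
  if st.2 > 0 then
    (st.1.modify i [] (· ++ [path ++ [[1]] ++ [PySem.List.pyGetD truck_path (field + 1) []]]), st.2 - 1)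
  else
    (st.1.modify i [] (· ++ [path ++ [PySem.List.pyGetD truck_path field []] ++ [PySem.List.pyGetD truck_path (field + 1) []]]), st.2)

def stepF (truck_path : List (List Int)) (given_drone_num : Int) (estim_pathes : List Int) (drones : DictT) (field : Int) : DictT :=
  let circles := PySem.Int.floordiv (PySem.List.pyGetD estim_pathes field 0) given_drone_num
  let remainder := PySem.Int.mod (PySem.List.pyGetD estim_pathes field 0) given_drone_num
  if circles > 0 ∧ remainder > 0 then
    extra_path_cycle estim_pathes given_drone_num truck_path drones remainder field circles
  else if circles > 0 ∧ remainder = 0 then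
    full_cycle estim_pathes given_drone_num truck_path drones field
  else
    extra_drone_cycle estim_pathes given_drone_num truck_path drones field

theorem epc_eq (est : List Int) (n : Int) (tp : List (List Int)) (d : DictT) (rem0 field circles : Int) :
    extra_path_cycle est n tp d rem0 field circles
      = ((PySem.List.pyRange 0 n).foldl (stepE1 tp field circles rem0) (d, rem0)).1 := rfl

theorem fc_eq (est : List Int) (n : Int) (tp : List (List Int)) (d : DictT) (field : Int) :
    full_cycle est n tp d field
      = (PySem.List.pyRange 0 n).foldl
          (stepE2 tp field (PySem.Int.truncdiv (PySem.List.pyGetD est field 0) n)) d := rfl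

theorem edc_eq (est : List Int) (n : Int) (tp : List (List Int)) (d : DictT) (field : Int) :
    extra_drone_cycle est n tp d field
      = ((PySem.List.pyRange 0 n).foldl (stepE3 tp field) (d, PySem.List.pyGetD est field 0)).1 := rfl

theorem wtmf_eq (tp : List (List Int)) (n : Int) (est : List Int) :
    when_to_move_forward tp n est
      = ((PySem.List.pyRange 0 (est.length : Int)).foldl (stepF tp n est)
          ((PySem.List.pyRange 0 n).foldl (fun d k => d.insert k []) PySem.Dict.empty)).items := rfl

theorem pair_fold {beta : Type} (bl : List (List Int)) (L : List Int) (p : List (List Int)) (r : beta) :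
    L.foldl (fun pr (_ : Int) => (pr.1 ++ bl, pr.2)) (p, r) = (p ++ (List.replicate L.length bl).flatten, r) := by
  induction L generalizing p with
  | nil => simp
  | cons x xs ih => simp [ih, List.replicate_succ, List.append_assoc]

theorem flat_succ (k : Nat) (bl : List (List Int)) :
    (List.replicate (k + 1) bl).flatten = bl ++ (List.replicate k bl).flatten := by
  simp [List.replicate_succ]

theorem flat_succ' (k : Nat) (bl : List (List Int)) :
    (List.replicate (k + 1) bl).flatten = (List.replicate k bl).flatten ++ bl := by
  simp [List.replicate_succ']

theorem flatMap_const (bl : List (List Int)) (L : List Int) :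
    L.flatMap (fun _ => bl) = (List.replicate L.length bl).flatten := by
  induction L with
  | nil => simp
  | cons x xs ih => simp [ih, List.replicate_succ]

theorem inner_fold (tp : List (List Int)) (field circles : Int) (hc : 0 < circles)
    (p0 : List (List Int)) (r : Int) :
    (PySem.List.pyRange 0 circles).foldl (fun pr j =>
      let path := pr.1 ++ [PySem.List.pyGetD tp field []]
      if j ≠ circles - 1 then (path ++ [[1]], pr.2)
      else if j = circles - 1 ∧ pr.2 > 0 then (path ++ [[1]], pr.2 - 1)
      else (path ++ [PySem.List.pyGetD tp field []], pr.2)) (p0, r)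
    = (p0 ++ (List.replicate (circles.toNat - 1) [PySem.List.pyGetD tp field [], [1]]).flatten
         ++ [PySem.List.pyGetD tp field []]
         ++ (if 0 < r then [[1]] else [PySem.List.pyGetD tp field []]),
       if 0 < r then r - 1 else r) := by
  have h1 : circles - 1 + 1 = circles := by omega
  have hsplit := PySem.List.pyRange_one_succ_right (a := 0) (b := circles - 1) (by omega)
  rw [h1] at hsplit
  rw [hsplit, List.foldl_append]
  have hcongr := PySem.List.foldl_congr_mem (PySem.List.pyRange 0 (circles - 1))
    (fun pr j =>
      let path := pr.1 ++ [PySem.List.pyGetD tp field []]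
      if j ≠ circles - 1 then (path ++ [[1]], pr.2)
      else if j = circles - 1 ∧ pr.2 > 0 then (path ++ [[1]], pr.2 - 1)
      else (path ++ [PySem.List.pyGetD tp field []], pr.2))
    (fun pr (_ : Int) => (pr.1 ++ [PySem.List.pyGetD tp field [], [1]], pr.2)) (p0, r) ?_
  · rw [hcongr, pair_fold, length_pyRange_zero]
    have hlen : (circles - 1).toNat = circles.toNat - 1 := by omega
    rw [hlen]
    simp only [List.foldl_cons, List.foldl_nil]
    have hne : ¬ (circles - 1 ≠ circles - 1) := by simp
    by_cases hr : 0 < r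
    · simp [hne, hr, List.append_assoc]
    · simp [hne, hr, List.append_assoc]
  · intro acc x hx
    have hxm := PySem.List.mem_pyRange_one.mp hx
    have : x ≠ circles - 1 := by omega
    simp [this, List.append_assoc]

theorem stepE1_apply (tp : List (List Int)) (field circles rem0 : Int)
    (hr0 : ¬ rem0 = 0) (hc : 0 < circles) (d : DictT) (r i : Int) :
    stepE1 tp field circles rem0 (d, r) i =
      (d.modify i [] (· ++ [if 0 < r then
          ([] ++ [PySem.List.pyGetD tp field []] ++ [[1]])
            ++ (List.replicate (circles.toNat - 1) [PySem.List.pyGetD tp field [], [1]]).flatten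
            ++ [PySem.List.pyGetD tp field []] ++ [[1]] ++ [PySem.List.pyGetD tp (field + 1) []]
        else
          ([] ++ [PySem.List.pyGetD tp field []] ++ [[1]])
            ++ (List.replicate (circles.toNat - 1) [PySem.List.pyGetD tp field [], [1]]).flatten
            ++ [PySem.List.pyGetD tp field []] ++ [PySem.List.pyGetD tp field []]
            ++ [PySem.List.pyGetD tp (field + 1) []]]),
       if 0 < r then r - 1 else r) := by
  show (if rem0 = 0 then _ else _) = _
  rw [if_neg hr0]
  rw [show ((PySem.List.pyRange 0 circles).foldl _ _ : List (List Int) × Int) = _ from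
    inner_fold tp field circles hc ([] ++ [PySem.List.pyGetD tp field []] ++ [[1]]) r]
  by_cases hr : 0 < r <;> simp [hr, List.append_assoc]

theorem stepE3_apply (tp : List (List Int)) (field : Int) (d : DictT) (r i : Int) :
    stepE3 tp field (d, r) i =
      (d.modify i [] (· ++ [if 0 < r then
          [PySem.List.pyGetD tp field []] ++ [[1]] ++ [PySem.List.pyGetD tp (field + 1) []]
        else
          [PySem.List.pyGetD tp field []] ++ [PySem.List.pyGetD tp field []]
            ++ [PySem.List.pyGetD tp (field + 1) []]]),
       if 0 < r then r - 1 else r) := by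
  show (if r > 0 then _ else _) = _
  by_cases hr : 0 < r <;> simp [hr, gt_iff_lt]

theorem stepE2_apply (tp : List (List Int)) (field rounds : Int) (d : DictT) (i : Int) :
    stepE2 tp field rounds d i =
      d.modify i [] (· ++ [(List.replicate rounds.toNat [PySem.List.pyGetD tp field [], [1]]).flatten
        ++ [PySem.List.pyGetD tp (field + 1) []]]) := by
  show d.modify i [] (· ++ [(PySem.List.pyRange 0 rounds).foldl _ _ ++ _]) = _
  have hcongr := PySem.List.foldl_congr_mem (PySem.List.pyRange 0 rounds)
    (fun p (_ : Int) => p ++ [PySem.List.pyGetD tp field []] ++ [[1]])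
    (fun p (_ : Int) => p ++ [PySem.List.pyGetD tp field [], [1]]) ([] : List (List Int))
    (by intro acc x _; simp [List.append_assoc])
  rw [hcongr, PySem.List.foldl_append_eq_flatMap, flatMap_const, length_pyRange_zero]
  simp

-- a drone loop that appends (if 0 < counter then u else v) to every key 0..N-1, decrementing the counter while positive
theorem dec_fold_aux (u v : List (List Int)) (step : DictT × Int → Int → DictT × Int)
    (hstep : ∀ (d : DictT) (r i : Int), step (d, r) i =
      (d.modify i [] (· ++ [if 0 < r then u else v]), if 0 < r then r - 1 else r)) :
    ∀ (N : Nat) (r0 : Int) (d : DictT), (∀ j : Nat, j < N → d.contains (j : Int) = true) →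
    ((List.map (fun (j : Nat) => (j : Int)) (List.range N)).foldl step (d, r0)).2 = r0 - min (N : Int) (max r0 0) ∧
    ((List.map (fun (j : Nat) => (j : Int)) (List.range N)).foldl step (d, r0)).1.keys = d.keys ∧
    ∀ k : Int, ((List.map (fun (j : Nat) => (j : Int)) (List.range N)).foldl step (d, r0)).1.getD k []
      = if 0 ≤ k ∧ k < (N : Int) then d.getD k [] ++ [if k < r0 then u else v] else d.getD k [] := by
  intro N
  induction N with
  | zero =>
    intro r0 d hcont
    refine ⟨by simp only [List.range_zero, List.map_nil, List.foldl_nil]; omega,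
      by simp only [List.range_zero, List.map_nil, List.foldl_nil], ?_⟩
    intro k
    have hcnd : ¬ (0 ≤ k ∧ k < ((0 : Nat) : Int)) := by omega
    simp only [List.range_zero, List.map_nil, List.foldl_nil]
    rw [if_neg hcnd]
  | succ N ih =>
    intro r0 d hcont
    rw [List.range_succ, List.map_append, List.foldl_append]
    obtain ⟨h2, hk, hg⟩ := ih r0 d (fun j hj => hcont j (by omega))
    rcases e : (List.map (fun (j : Nat) => (j : Int)) (List.range N)).foldl step (d, r0) with ⟨d', r'⟩
    rw [e] at h2 hk hg

    simp only [List.map_cons, List.map_nil, List.foldl_cons, List.foldl_nil, hstep]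
    have hcN : d'.contains ((N : Nat) : Int) = true := by
      rw [PySem.Dict.contains_iff_mem_keys, hk, ← PySem.Dict.contains_iff_mem_keys]
      exact hcont N (by omega)
    have hiff : (0 < r') ↔ ((N : Int) < r0) := by omega
    refine ⟨by omega, ?_, ?_⟩
    · rw [PySem.Dict.keys_modify, PySem.Dict.keys_insert_of_contains _ _ hcN, hk]
    · intro k
      rw [PySem.Dict.getD_modify]
      by_cases hkN : k = (N : Int)
      · subst hkN
        rw [if_pos rfl, hg]
        have hc1 : ¬ (0 ≤ ((N : Nat) : Int) ∧ ((N : Nat) : Int) < (N : Int)) := by omega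
        have hc2 : (0 ≤ ((N : Nat) : Int) ∧ ((N : Nat) : Int) < ((N + 1 : Nat) : Int)) := by
          push_cast; omega
        rw [if_neg hc1, if_pos hc2]
        by_cases hlt : (N : Int) < r0
        · rw [if_pos (hiff.mpr hlt), if_pos hlt]
        · rw [if_neg (fun h => hlt (hiff.mp h)), if_neg hlt]
      · rw [if_neg hkN, hg]
        by_cases hcnd : 0 ≤ k ∧ k < (N : Int)
        · have : (0 ≤ k ∧ k < ((N + 1 : Nat) : Int)) := by push_cast; omega
          rw [if_pos hcnd, if_pos this]
        · have : ¬ (0 ≤ k ∧ k < ((N + 1 : Nat) : Int)) := by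
            push_cast; push_cast at hcnd; omega
          rw [if_neg hcnd, if_neg this]

-- a drone loop that appends the same path to every key 0..N-1
theorem pure_fold_aux (P : List (List Int)) (step : DictT → Int → DictT)
    (hstep : ∀ (d : DictT) (i : Int), step d i = d.modify i [] (· ++ [P])) :
    ∀ (N : Nat) (d : DictT), (∀ j : Nat, j < N → d.contains (j : Int) = true) →
    ((List.map (fun (j : Nat) => (j : Int)) (List.range N)).foldl step d).keys = d.keys ∧
    ∀ k : Int, ((List.map (fun (j : Nat) => (j : Int)) (List.range N)).foldl step d).getD k []
      = if 0 ≤ k ∧ k < (N : Int) then d.getD k [] ++ [P] else d.getD k [] := by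
  intro N
  induction N with
  | zero =>
    intro d hcont
    refine ⟨by simp only [List.range_zero, List.map_nil, List.foldl_nil], ?_⟩
    intro k
    have hcnd : ¬ (0 ≤ k ∧ k < ((0 : Nat) : Int)) := by omega
    simp only [List.range_zero, List.map_nil, List.foldl_nil]
    rw [if_neg hcnd]
  | succ N ih =>
    intro d hcont
    rw [List.range_succ, List.map_append, List.foldl_append]
    obtain ⟨hk, hg⟩ := ih d (fun j hj => hcont j (by omega))
    simp only [List.map_cons, List.map_nil, List.foldl_cons, List.foldl_nil, hstep]
    have hcN : ((List.map (fun (j : Nat) => (j : Int)) (List.range N)).foldl step d).contains ((N : Nat) : Int) = true := by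
      rw [PySem.Dict.contains_iff_mem_keys, hk, ← PySem.Dict.contains_iff_mem_keys]
      exact hcont N (by omega)
    refine ⟨?_, ?_⟩
    · rw [PySem.Dict.keys_modify, PySem.Dict.keys_insert_of_contains _ _ hcN, hk]
    · intro k
      rw [PySem.Dict.getD_modify]
      by_cases hkN : k = (N : Int)
      · subst hkN
        rw [if_pos rfl, hg]
        have hc1 : ¬ (0 ≤ ((N : Nat) : Int) ∧ ((N : Nat) : Int) < (N : Int)) := by omega
        have hc2 : (0 ≤ ((N : Nat) : Int) ∧ ((N : Nat) : Int) < ((N + 1 : Nat) : Int)) := by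
          push_cast; omega
        rw [if_neg hc1, if_pos hc2]
      · rw [if_neg hkN, hg]
        by_cases hcnd : 0 ≤ k ∧ k < (N : Int)
        · have : (0 ≤ k ∧ k < ((N + 1 : Nat) : Int)) := by push_cast; omega
          rw [if_pos hcnd, if_pos this]
        · have : ¬ (0 ≤ k ∧ k < ((N + 1 : Nat) : Int)) := by
            push_cast; push_cast at hcnd; omega
          rw [if_neg hcnd, if_neg this]


theorem nodup_pyRange_zero (n : Int) : (PySem.List.pyRange 0 n).Nodup := by
  rw [pyRange_zero_eq]
  exact List.Nodup.map (fun a b h => by exact_mod_cast h) List.nodup_range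

theorem init_dict_spec (n : Int) :
    ((PySem.List.pyRange 0 n).foldl (fun (d : DictT) k => d.insert k []) PySem.Dict.empty).keys
        = PySem.List.pyRange 0 n ∧
    ∀ k : Int, ((PySem.List.pyRange 0 n).foldl (fun (d : DictT) k => d.insert k []) PySem.Dict.empty).getD k [] = [] := by
  have hitems := PySem.Dict.items_foldl_insert_fresh (l := PySem.List.pyRange 0 n)
      (k := fun a => a) (v := fun _ => ([] : List (List (List Int)))) (d := PySem.Dict.empty)
      (by intro a _; simp) (by simpa using nodup_pyRange_zero n)
  simp only at hitems
  have hkeys : ((PySem.List.pyRange 0 n).foldl (fun (d : DictT) k => d.insert k []) PySem.Dict.empty).keys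
      = PySem.List.pyRange 0 n := by
    simp only [PySem.Dict.keys, hitems]
    simp [PySem.Dict.empty, Function.comp_def]
  refine ⟨hkeys, ?_⟩
  intro k
  by_cases hm : k ∈ PySem.List.pyRange 0 n
  · refine PySem.Dict.getD_of_mem_items _ ?_ (by rw [hkeys]; exact nodup_pyRange_zero n) []
    rw [hitems]
    simp only [List.mem_append, List.mem_map]
    exact Or.inr ⟨k, hm, rfl⟩
  · apply PySem.Dict.getD_of_not_contains
    have hne : ¬ (((PySem.List.pyRange 0 n).foldl (fun (d : DictT) k => d.insert k []) PySem.Dict.empty).contains k = true) := by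
      rw [PySem.Dict.contains_iff_mem_keys, hkeys]
      exact hm
    exact Bool.eq_false_iff.mpr hne

theorem cast_cond_iff (n : Int) (k : Int) : (0 ≤ k ∧ k < ((n.toNat : Nat) : Int)) ↔ (0 ≤ k ∧ k < n) := by omega

theorem epc_spec (est : List Int) (n : Int) (tp : List (List Int)) (d : DictT) (p field : Int)
    (hc : 0 < PySem.Int.floordiv p n) (hr : 0 < PySem.Int.mod p n)
    (hcont : ∀ j : Int, 0 ≤ j → j < n → d.contains j = true) :
    (extra_path_cycle est n tp d (PySem.Int.mod p n) field (PySem.Int.floordiv p n)).keys = d.keys ∧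
    ∀ k : Int, (extra_path_cycle est n tp d (PySem.Int.mod p n) field (PySem.Int.floordiv p n)).getD k []
      = if 0 ≤ k ∧ k < n then d.getD k []
          ++ [if k < PySem.Int.mod p n then ([] ++ [PySem.List.pyGetD tp field []] ++ [[1]]) ++ (List.replicate ((PySem.Int.floordiv p n).toNat - 1) [PySem.List.pyGetD tp field [], [1]]).flatten ++ [PySem.List.pyGetD tp field []] ++ [[1]] ++ [PySem.List.pyGetD tp (field + 1) []] else ([] ++ [PySem.List.pyGetD tp field []] ++ [[1]]) ++ (List.replicate ((PySem.Int.floordiv p n).toNat - 1) [PySem.List.pyGetD tp field [], [1]]).flatten ++ [PySem.List.pyGetD tp field []] ++ [PySem.List.pyGetD tp field []] ++ [PySem.List.pyGetD tp (field + 1) []]]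
        else d.getD k [] := by
  rw [epc_eq, pyRange_zero_eq]
  obtain ⟨h2, hk, hg⟩ := dec_fold_aux (([] ++ [PySem.List.pyGetD tp field []] ++ [[1]]) ++ (List.replicate ((PySem.Int.floordiv p n).toNat - 1) [PySem.List.pyGetD tp field [], [1]]).flatten ++ [PySem.List.pyGetD tp field []] ++ [[1]] ++ [PySem.List.pyGetD tp (field + 1) []]) (([] ++ [PySem.List.pyGetD tp field []] ++ [[1]]) ++ (List.replicate ((PySem.Int.floordiv p n).toNat - 1) [PySem.List.pyGetD tp field [], [1]]).flatten ++ [PySem.List.pyGetD tp field []] ++ [PySem.List.pyGetD tp field []] ++ [PySem.List.pyGetD tp (field + 1) []])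
    (stepE1 tp field (PySem.Int.floordiv p n) (PySem.Int.mod p n))
    (fun d r i => stepE1_apply tp field (PySem.Int.floordiv p n) (PySem.Int.mod p n) (by omega) hc d r i)
    n.toNat (PySem.Int.mod p n) d (fun j hj => hcont j (by omega) (by omega))
  refine ⟨hk, fun k => ?_⟩
  rw [hg k]
  by_cases hcnd : 0 ≤ k ∧ k < n
  · rw [if_pos ((cast_cond_iff n k).mpr hcnd), if_pos hcnd]
  · rw [if_neg (fun h => hcnd ((cast_cond_iff n k).mp h)), if_neg hcnd]

theorem fc_spec (est : List Int) (n : Int) (tp : List (List Int)) (d : DictT) (field : Int)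
    (hcont : ∀ j : Int, 0 ≤ j → j < n → d.contains j = true) :
    (full_cycle est n tp d field).keys = d.keys ∧
    ∀ k : Int, (full_cycle est n tp d field).getD k []
      = if 0 ≤ k ∧ k < n then d.getD k []
          ++ [(List.replicate (PySem.Int.truncdiv (PySem.List.pyGetD est field 0) n).toNat [PySem.List.pyGetD tp field [], [1]]).flatten
              ++ [PySem.List.pyGetD tp (field + 1) []]]
        else d.getD k [] := by
  rw [fc_eq, pyRange_zero_eq]
  obtain ⟨hk, hg⟩ := pure_fold_aux
    ((List.replicate (PySem.Int.truncdiv (PySem.List.pyGetD est field 0) n).toNat [PySem.List.pyGetD tp field [], [1]]).flatten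
      ++ [PySem.List.pyGetD tp (field + 1) []])
    (stepE2 tp field (PySem.Int.truncdiv (PySem.List.pyGetD est field 0) n))
    (fun d i => stepE2_apply tp field (PySem.Int.truncdiv (PySem.List.pyGetD est field 0) n) d i)
    n.toNat d (fun j hj => hcont j (by omega) (by omega))
  refine ⟨hk, fun k => ?_⟩
  rw [hg k]
  by_cases hcnd : 0 ≤ k ∧ k < n
  · rw [if_pos ((cast_cond_iff n k).mpr hcnd), if_pos hcnd]
  · rw [if_neg (fun h => hcnd ((cast_cond_iff n k).mp h)), if_neg hcnd]

theorem edc_spec (est : List Int) (n : Int) (tp : List (List Int)) (d : DictT) (field : Int)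
    (hcont : ∀ j : Int, 0 ≤ j → j < n → d.contains j = true) :
    (extra_drone_cycle est n tp d field).keys = d.keys ∧
    ∀ k : Int, (extra_drone_cycle est n tp d field).getD k []
      = if 0 ≤ k ∧ k < n then d.getD k []
          ++ [if k < PySem.List.pyGetD est field 0 then
                [PySem.List.pyGetD tp field []] ++ [[1]] ++ [PySem.List.pyGetD tp (field + 1) []]
              else
                [PySem.List.pyGetD tp field []] ++ [PySem.List.pyGetD tp field []] ++ [PySem.List.pyGetD tp (field + 1) []]]
        else d.getD k [] := by
  rw [edc_eq, pyRange_zero_eq]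
  obtain ⟨h2, hk, hg⟩ := dec_fold_aux
    ([PySem.List.pyGetD tp field []] ++ [[1]] ++ [PySem.List.pyGetD tp (field + 1) []])
    ([PySem.List.pyGetD tp field []] ++ [PySem.List.pyGetD tp field []] ++ [PySem.List.pyGetD tp (field + 1) []])
    (stepE3 tp field) (fun d r i => stepE3_apply tp field d r i)
    n.toNat (PySem.List.pyGetD est field 0) d (fun j hj => hcont j (by omega) (by omega))
  refine ⟨hk, fun k => ?_⟩
  rw [hg k]
  by_cases hcnd : 0 ≤ k ∧ k < n
  · rw [if_pos ((cast_cond_iff n k).mpr hcnd), if_pos hcnd]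
  · rw [if_neg (fun h => hcnd ((cast_cond_iff n k).mp h)), if_neg hcnd]

theorem dronePath_case1 (tp : List (List Int)) (n k field p : Int)
    (hc : 0 < PySem.Int.floordiv p n) (hr : 0 < PySem.Int.mod p n) :
    dronePath tp n k field p = if k < PySem.Int.mod p n then ([] ++ [PySem.List.pyGetD tp field []] ++ [[1]]) ++ (List.replicate ((PySem.Int.floordiv p n).toNat - 1) [PySem.List.pyGetD tp field [], [1]]).flatten ++ [PySem.List.pyGetD tp field []] ++ [[1]] ++ [PySem.List.pyGetD tp (field + 1) []] else ([] ++ [PySem.List.pyGetD tp field []] ++ [[1]]) ++ (List.replicate ((PySem.Int.floordiv p n).toNat - 1) [PySem.List.pyGetD tp field [], [1]]).flatten ++ [PySem.List.pyGetD tp field []] ++ [PySem.List.pyGetD tp field []] ++ [PySem.List.pyGetD tp (field + 1) []] := by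
  simp only [dronePath]
  rw [if_pos hc, if_neg (by omega : ¬ PySem.Int.mod p n = 0)]
  obtain ⟨m, hm⟩ : ∃ m, (PySem.Int.floordiv p n).toNat = m + 1 := ⟨(PySem.Int.floordiv p n).toNat - 1, by omega⟩
  rw [hm]
  by_cases hk : k < PySem.Int.mod p n
  · rw [if_pos hk, if_pos hk, Nat.add_sub_cancel, flat_succ (m + 1), flat_succ' m]
    simp [List.append_assoc]
  · rw [if_neg hk, if_neg hk, Nat.add_sub_cancel, flat_succ m]
    simp [List.append_assoc]

theorem dronePath_case2 (tp : List (List Int)) (n k field p : Int) (hn : 0 < n)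
    (hc : 0 < PySem.Int.floordiv p n) (hr : PySem.Int.mod p n = 0) :
    dronePath tp n k field p
      = (List.replicate (PySem.Int.truncdiv p n).toNat [PySem.List.pyGetD tp field [], [1]]).flatten
          ++ [PySem.List.pyGetD tp (field + 1) []] := by
  have hdvd : n ∣ p := (PySem.Int.mod_eq_zero_iff_dvd p n).mp hr
  have htd : PySem.Int.truncdiv p n = PySem.Int.floordiv p n := by
    show p.tdiv n = _
    rw [Int.tdiv_eq_ediv_of_dvd hdvd, PySem.Int.floordiv_eq_ediv_of_pos hn]
  rw [htd]
  simp only [dronePath]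
  rw [if_pos hc, if_pos hr]

theorem dronePath_case3 (tp : List (List Int)) (n k field p : Int) (hn : 0 < n)
    (h1 : ¬ (PySem.Int.floordiv p n > 0 ∧ PySem.Int.mod p n > 0))
    (h2 : ¬ (PySem.Int.floordiv p n > 0 ∧ PySem.Int.mod p n = 0)) :
    dronePath tp n k field p
      = if k < p then
          [PySem.List.pyGetD tp field []] ++ [[1]] ++ [PySem.List.pyGetD tp (field + 1) []]
        else
          [PySem.List.pyGetD tp field []] ++ [PySem.List.pyGetD tp field []] ++ [PySem.List.pyGetD tp (field + 1) []] := by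
  have hrnn : 0 ≤ PySem.Int.mod p n := PySem.Int.mod_nonneg p hn
  have hcle : ¬ (0 < PySem.Int.floordiv p n) := by omega
  simp only [dronePath]
  rw [if_neg hcle]
  by_cases hk : k < p
  · rw [if_pos hk, if_pos hk]
    rfl
  · rw [if_neg hk, if_neg hk]
    rfl

theorem stepF_spec (tp : List (List Int)) (n : Int) (est : List Int) (field : Int) (d : DictT)
    (hcont : ∀ j : Int, 0 ≤ j → j < n → d.contains j = true) :
    (stepF tp n est d field).keys = d.keys ∧
    ∀ k : Int, (stepF tp n est d field).getD k []
      = if 0 ≤ k ∧ k < n then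
          d.getD k [] ++ [dronePath tp n k field (PySem.List.pyGetD est field 0)]
        else d.getD k [] := by
  simp only [stepF]
  split_ifs with h1 h2
  · obtain ⟨hk, hg⟩ := epc_spec est n tp d (PySem.List.pyGetD est field 0) field h1.1 h1.2 hcont
    refine ⟨hk, fun k => ?_⟩
    rw [hg k]
    by_cases hcnd : 0 ≤ k ∧ k < n
    · rw [if_pos hcnd, if_pos hcnd,
        dronePath_case1 tp n k field (PySem.List.pyGetD est field 0) h1.1 h1.2]
    · rw [if_neg hcnd, if_neg hcnd]
  · obtain ⟨hk, hg⟩ := fc_spec est n tp d field hcont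
    refine ⟨hk, fun k => ?_⟩
    rw [hg k]
    by_cases hcnd : 0 ≤ k ∧ k < n
    · rw [if_pos hcnd, if_pos hcnd,
        dronePath_case2 tp n k field (PySem.List.pyGetD est field 0) (by omega) h2.1 h2.2]
    · rw [if_neg hcnd, if_neg hcnd]
  · obtain ⟨hk, hg⟩ := edc_spec est n tp d field hcont
    refine ⟨hk, fun k => ?_⟩
    rw [hg k]
    by_cases hcnd : 0 ≤ k ∧ k < n
    · rw [if_pos hcnd, if_pos hcnd,
        dronePath_case3 tp n k field (PySem.List.pyGetD est field 0) (by omega) h1 h2]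
    · rw [if_neg hcnd, if_neg hcnd]

theorem field_aux (tp : List (List Int)) (n : Int) (est : List Int) :
    ∀ (M : Nat), M ≤ est.length → ∀ (d : DictT), (∀ j : Int, 0 ≤ j → j < n → d.contains j = true) →
    ((List.map (fun (j : Nat) => (j : Int)) (List.range M)).foldl (stepF tp n est) d).keys = d.keys ∧
    ∀ k : Int, ((List.map (fun (j : Nat) => (j : Int)) (List.range M)).foldl (stepF tp n est) d).getD k []
      = if 0 ≤ k ∧ k < n then
          d.getD k [] ++ (PySem.List.enumerate (est.take M)).map (fun fp => dronePath tp n k fp.1 fp.2)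
        else d.getD k [] := by
  intro M
  induction M with
  | zero =>
    intro _ d hcont
    refine ⟨by simp, fun k => ?_⟩
    simp only [List.range_zero, List.map_nil, List.foldl_nil, List.take_zero,
      PySem.List.enumerate_nil]
    by_cases hcnd : 0 ≤ k ∧ k < n
    · rw [if_pos hcnd]; simp
    · rw [if_neg hcnd]
  | succ M ih =>
    intro hM d hcont
    rw [List.range_succ, List.map_append, List.map_cons, List.map_nil, List.foldl_append,
      List.foldl_cons, List.foldl_nil]
    obtain ⟨hk, hg⟩ := ih (by omega) d hcont
    have hcont' : ∀ j : Int, 0 ≤ j → j < n →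
        ((List.map (fun (j : Nat) => (j : Int)) (List.range M)).foldl (stepF tp n est) d).contains j = true := by
      intro j h0 hj
      rw [PySem.Dict.contains_iff_mem_keys, hk, ← PySem.Dict.contains_iff_mem_keys]
      exact hcont j h0 hj
    obtain ⟨hk2, hg2⟩ := stepF_spec tp n est ((M : Nat) : Int) _ hcont'
    refine ⟨by rw [hk2, hk], fun k => ?_⟩
    rw [hg2 k]
    by_cases hcnd : 0 ≤ k ∧ k < n
    · rw [if_pos hcnd, hg k, if_pos hcnd, if_pos hcnd]
      have hMlt : M < est.length := by omega
      have htake : est.take (M + 1) = est.take M ++ [est[M]] := by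
        rw [List.take_add_one]
        simp [List.getElem?_eq_getElem hMlt]
      have hlen : (est.take M).length = M := by rw [List.length_take]; omega
      have hpg : PySem.List.pyGetD est ((M : Nat) : Int) 0 = est[M] := by
        rw [PySem.List.pyGetD_natCast, List.getD_eq_getElem est 0 hMlt]
      rw [htake, PySem.List.enumerate_append, hlen, PySem.List.enumerate_cons,
        PySem.List.enumerate_nil, hpg]
      simp [List.append_assoc]
    · rw [if_neg hcnd, hg k, if_neg hcnd, if_neg hcnd]

-- ===== VERDICT (by name: the statements are the Claim_ definitions above) =====
theorem when_to_move_forward_spec : Claim_equal_when_to_move_forward := by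
  intro tp n est _ _
  show when_to_move_forward tp n est = when_to_move_forward_alt tp n est
  rw [wtmf_eq]
  obtain ⟨hk0, hg0⟩ := init_dict_spec n
  have hcont0 : ∀ j : Int, 0 ≤ j → j < n →
      ((PySem.List.pyRange 0 n).foldl (fun (d : DictT) k => d.insert k []) PySem.Dict.empty).contains j = true := by
    intro j h0 hj
    rw [PySem.Dict.contains_iff_mem_keys, hk0]
    exact PySem.List.mem_pyRange_one.mpr ⟨h0, hj⟩
  rw [pyRange_zero_eq ((est.length : Nat) : Int), Int.toNat_natCast]
  obtain ⟨hkF, hgF⟩ := field_aux tp n est est.length (le_refl _) _ hcont0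
  have hnodup : ((List.map (fun (j : Nat) => (j : Int)) (List.range est.length)).foldl (stepF tp n est)
      ((PySem.List.pyRange 0 n).foldl (fun (d : DictT) k => d.insert k []) PySem.Dict.empty)).keys.Nodup := by
    rw [hkF, hk0]
    exact nodup_pyRange_zero n
  rw [PySem.Dict.items_eq_map_keys _ hnodup [], hkF, hk0]
  simp only [when_to_move_forward_alt]
  apply List.map_congr_left
  intro k hkmem
  have hb := PySem.List.mem_pyRange_one.mp hkmem
  rw [hgF k, if_pos hb, hg0 k, List.take_length]
  simp
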